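-- pv_equiv track=rewrite | github.com/UnKnownGamingCommunity/PyTetris | client/items_singleplayer.py | DoEvent
-- ===== SOURCE A (Python) =====
-- def DoEvent(gameFiled, filedWidth, filedHeight):
--     for y in range(filedHeight):
--         shift = 0
--         for x in range(filedWidth):
--             if gameFiled[y][x] == 0:
--                 shift += 1
--             else:
--                 gameFiled[y][x - shift] = gameFiled[y][x]
--     return gameFiled
-- ===== SOURCE B (Python) =====
-- def DoEvent(gameFiled, filedWidth, filedHeight):
--     for y in range(filedHeight):
--         row = gameFiled[y]
--         head = row[:filedWidth]
--         for _ in range(head.count(0)):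
--             head.remove(0)
--         row[:len(head)] = head
--     return gameFiled
-- ===== Notes on version B (the rewrite author's own statement) =====
-- stated objective: alternative
-- what changed: Instead of A's single compaction pass with a shift counter writing each non-zero cell leftward in place, B copies each row's prefix, deletes its zeros one by one with repeated list.remove(0) (count(0) passes), and splices the shrunken copy back onto the front of the row with one slice assignment, leaving the tail untouched exactly as A does.
-- outside the precondition, e.g. on DoEvent([[0, 3, 5]], -1, 1): A returns [[0, 3, 5]], B returns [[3, 3, 5]]; on DoEvent([[1]], 0, 2): A returns [[1]], B raises IndexError
import Mathlib
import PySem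

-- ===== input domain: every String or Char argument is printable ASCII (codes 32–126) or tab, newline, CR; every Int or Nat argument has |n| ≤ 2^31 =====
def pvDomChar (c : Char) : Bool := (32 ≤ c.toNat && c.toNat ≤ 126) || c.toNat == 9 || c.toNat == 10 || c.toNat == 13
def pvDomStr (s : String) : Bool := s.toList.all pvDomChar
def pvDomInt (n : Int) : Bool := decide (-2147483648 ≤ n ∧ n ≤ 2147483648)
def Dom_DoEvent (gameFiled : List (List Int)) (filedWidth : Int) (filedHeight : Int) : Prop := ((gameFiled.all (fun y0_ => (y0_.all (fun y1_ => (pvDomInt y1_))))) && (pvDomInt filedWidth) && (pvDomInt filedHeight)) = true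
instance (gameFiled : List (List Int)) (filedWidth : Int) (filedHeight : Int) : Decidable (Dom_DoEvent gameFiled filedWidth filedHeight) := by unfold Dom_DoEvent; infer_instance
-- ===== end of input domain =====

-- B replaces A's shift-counter compaction pass by a deletion algorithm: copy the row's
-- prefix, delete its zeros with repeated list.remove(0), splice the copy back onto the
-- row's front (objective: alternative; not faster).  Both Pythons mutate gameFiled in
-- place the same way on Pre_; the equivalence proved here is about the returned value.

-- ===== PORT A =====
-- l[i] = v for a nonnegative int index i (the only indices the loops produce);
-- exact for 0 ≤ i < l.length, which Pre_ guarantees (Python raises out of range).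
def pvSet {α : Type} (l : List α) (i : Int) (v : α) : List α :=
  if 0 ≤ i then l.set i.toNat v else l

-- inner loop of A on the row gameFiled[y] (all its reads/writes touch only that row):
-- state = (row, shift); `none` from pyGet? is Python's IndexError, excluded by Pre_.
def pvInnerA (filedWidth : Int) (row : List Int) : List Int :=
  ((PySem.List.pyRange 0 filedWidth 1).foldl
    (fun st x =>
      match PySem.List.pyGet? st.1 x with
      | none => st
      | some v => if v = 0 then (st.1, st.2 + 1) else (pvSet st.1 (x - st.2) v, st.2))
    (row, (0 : Int))).1

def DoEvent (gameFiled : List (List Int)) (filedWidth : Int) (filedHeight : Int) : List (List Int) :=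
  (PySem.List.pyRange 0 filedHeight 1).foldl
    (fun acc y =>
      match PySem.List.pyGet? acc y with
      | none => acc          -- IndexError in Python; outside Pre_
      | some row => pvSet acc y (pvInnerA filedWidth row))
    gameFiled

-- ===== PORT B =====
-- one `head.remove(0)`; the `none` branch is Python's ValueError (never reached: the
-- loop runs exactly head.count(0) times).
def pvDelStep (h : List Int) : List Int :=
  match PySem.List.remove? h 0 with
  | none => h
  | some h' => h'

-- `head = row[:filedWidth]; for _ in range(head.count(0)): head.remove(0)`
def pvDelLoop (filedWidth : Int) (row : List Int) : List Int :=
  (PySem.List.pyRange 0 (PySem.List.count (PySem.List.slice row none (some filedWidth)) 0 : Nat) 1).foldl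
    (fun h _ => pvDelStep h)
    (PySem.List.slice row none (some filedWidth))

-- row[:len(head)] = head; exact since len(head) ≤ len(row) always (head shrinks a prefix).
def pvSplice (head row : List Int) : List Int := head ++ row.drop head.length

def DoEvent_alt (gameFiled : List (List Int)) (filedWidth : Int) (filedHeight : Int) : List (List Int) :=
  (PySem.List.pyRange 0 filedHeight 1).foldl
    (fun acc y =>
      match PySem.List.pyGet? acc y with
      | none => acc          -- IndexError in Python; outside Pre_
      | some row => pvSet acc y (pvSplice (pvDelLoop filedWidth row) row))
    gameFiled

-- ===== PRECONDITION & SPEC =====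
-- Pre_ excludes: (a) filedHeight > len(gameFiled) with positive filedHeight (A raises
-- IndexError for positive width; for width ≤ 0 A returns unchanged but B's row fetch
-- raises IndexError); (b) a processed row shorter than a nonnegative filedWidth (A raises
-- IndexError); (c) a negative filedWidth — outside the natural domain of a grid width —
-- but ONLY when some processed row's slice row[:filedWidth] contains a 0: there A's empty
-- range leaves the grid unchanged while B compacts the sliced prefix; on zero-free slices
-- (or height ≤ 0) a negative width stays inside Pre_ and A = B is proved.
def Pre_DoEvent (gameFiled : List (List Int)) (filedWidth : Int) (filedHeight : Int) : Prop :=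
  filedHeight ≤ 0 ∨
    (filedHeight ≤ (gameFiled.length : Int) ∧
      ((0 ≤ filedWidth ∧ ∀ r ∈ gameFiled.take filedHeight.toNat, filedWidth ≤ (r.length : Int)) ∨
       (filedWidth < 0 ∧ ∀ r ∈ gameFiled.take filedHeight.toNat,
          (0 : Int) ∉ PySem.List.slice r none (some filedWidth))))
instance (gameFiled : List (List Int)) (filedWidth : Int) (filedHeight : Int) : Decidable (Pre_DoEvent gameFiled filedWidth filedHeight) := by unfold Pre_DoEvent; infer_instance

def pvWitness_DoEvent : List (List Int) × Int × Int := ([[0, 3, 0, 5], [1, 0, 0, 2]], 4, 2)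

def Spec_DoEvent (gameFiled : List (List Int)) (filedWidth : Int) (filedHeight : Int) (out : List (List Int)) : Prop := out = DoEvent_alt gameFiled filedWidth filedHeight
instance (gameFiled : List (List Int)) (filedWidth : Int) (filedHeight : Int) (out : List (List Int)) : Decidable (Spec_DoEvent gameFiled filedWidth filedHeight out) := by unfold Spec_DoEvent; infer_instance

-- ===== CLAIM (what is proved, stated in full; the proofs are below) =====
def Claim_equal_DoEvent : Prop := ∀ (gameFiled : List (List Int)) (filedWidth : Int) (filedHeight : Int), Dom_DoEvent gameFiled filedWidth filedHeight → Pre_DoEvent gameFiled filedWidth filedHeight → Spec_DoEvent gameFiled filedWidth filedHeight (DoEvent gameFiled filedWidth filedHeight)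

-- ===== LEMMAS AND PROOFS =====

-- A's inner loop, characterised: after k steps the row is nz_k ++ (original tail) and shift = k - |nz_k|.
theorem pvInnerA_invariant (r : List Int) (k : Nat) (hk : k ≤ r.length) :
    ((PySem.List.pyRange 0 (k : Int) 1).foldl
      (fun st x =>
        match PySem.List.pyGet? st.1 x with
        | none => st
        | some v => if v = 0 then (st.1, st.2 + 1) else (pvSet st.1 (x - st.2) v, st.2))
      (r, (0 : Int)))
    = ((r.take k).filter (· ≠ 0) ++ r.drop ((r.take k).filter (· ≠ 0)).length,
       (k : Int) - ((r.take k).filter (· ≠ 0)).length) := by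
  induction k with
  | zero => simp [PySem.List.pyRange_one_eq_nil]
  | succ k ih =>
    have hk' : k ≤ r.length := Nat.le_of_succ_le hk
    have hklt : k < r.length := hk
    set nz := (r.take k).filter (· ≠ 0) with hnz
    have hm_le : nz.length ≤ k := le_trans (List.length_filter_le _ _) (by simp)
    have hlen : (nz ++ r.drop nz.length).length = r.length := by
      simp [List.length_drop]
      omega
    have hcast : ((k + 1 : Nat) : Int) = (k : Int) + 1 := by push_cast; ring
    rw [hcast, PySem.List.pyRange_one_succ_right (by positivity), List.foldl_append, ih hk']
    have hget : PySem.List.pyGet? (nz ++ r.drop nz.length) ((k : Int)) = some r[k] := by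
      rw [PySem.List.pyGet?_natCast]
      rw [List.getElem?_append_right (by omega)]
      rw [List.getElem?_drop]
      rw [List.getElem?_eq_getElem (by omega)]
      congr 1
      congr 1
      omega
    have htake : r.take (k + 1) = r.take k ++ [r[k]] := by
      rw [List.take_add_one, List.getElem?_eq_getElem hklt]
      rfl
    simp only [List.foldl_cons, List.foldl_nil, hget]
    by_cases h0 : r[k] = 0
    · have hfe : (r.take (k + 1)).filter (· ≠ 0) = nz := by
        rw [htake, List.filter_append, hnz]
        simp [h0]
      rw [hfe, if_pos h0, Prod.mk.injEq]
      exact ⟨rfl, by omega⟩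
    · have hfe : (r.take (k + 1)).filter (· ≠ 0) = nz ++ [r[k]] := by
        rw [htake, List.filter_append, hnz]
        simp [h0]
      have hidx : (k : Int) - ((k : Int) - (nz.length : Int)) = (nz.length : Int) := by ring
      have hdrop : r.drop nz.length = r[nz.length]'(by omega) :: r.drop (nz.length + 1) :=
        List.drop_eq_getElem_cons (by omega)
      have hset : pvSet (nz ++ r.drop nz.length) ((k : Int) - ((k : Int) - (nz.length : Int))) r[k]
          = (nz ++ [r[k]]) ++ r.drop (nz.length + 1) := by
        rw [hidx]
        unfold pvSet
        rw [if_pos (by positivity), Int.toNat_natCast, hdrop]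
        rw [List.set_append_right _ _ (le_refl _), Nat.sub_self, List.set_cons_zero]
        simp [List.append_assoc]
      rw [hfe, if_neg h0, hset, Prod.mk.injEq]
      refine ⟨by simp [List.append_assoc], ?_⟩
      simp only [List.length_append, List.length_cons, List.length_nil]
      push_cast
      omega

-- a fold that ignores the list's elements is an iterate of its length
theorem foldl_ignore {α β : Type} (f : β → β) (xs : List α) (b : β) :
    xs.foldl (fun acc _ => f acc) b = f^[xs.length] b := by
  induction xs generalizing b with
  | nil => rfl
  | cons x t ih => simp [List.foldl_cons, ih, Function.iterate_succ_apply]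

-- erasing one 0 does not change the cells a 0-rejecting filter keeps
theorem filter_erase_zero (p : Int → Bool) (hp : p 0 = false) (l : List Int) :
    (l.erase 0).filter p = l.filter p := by
  induction l with
  | nil => rfl
  | cons x t ih =>
    by_cases hx : x = 0
    · subst hx; rw [List.erase_cons_head, List.filter_cons, hp]
      simp
    · rw [List.erase_cons_tail (by simpa using hx), List.filter_cons, List.filter_cons, ih]

-- count-many deletion steps leave exactly the non-zero cells, in order
theorem iterate_del (n : Nat) : ∀ l : List Int, l.count 0 = n →
    pvDelStep^[n] l = l.filter (· ≠ 0) := by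
  induction n with
  | zero =>
    intro l hc
    have h0 : (0 : Int) ∉ l := by rwa [← List.count_eq_zero]
    rw [Function.iterate_zero_apply]
    symm
    apply List.filter_eq_self.2
    intro a ha
    simp only [decide_eq_true_eq]
    intro h; exact h0 (h ▸ ha)
  | succ n ih =>
    intro l hc
    have hmem : (0 : Int) ∈ l := by
      rw [← List.count_pos_iff]; omega
    have hstep : pvDelStep l = l.erase 0 := by
      unfold pvDelStep
      rw [PySem.List.remove?_eq_some_erase l 0 hmem]
    rw [Function.iterate_succ_apply, hstep,
        ih (l.erase 0) (by rw [List.count_erase_self]; omega),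
        filter_erase_zero _ (by simp) l]

-- B's per-row deletion loop computes the non-zero cells of the prefix
theorem pvDelLoop_eq (w : Int) (r : List Int) (hw : 0 ≤ w) :
    pvDelLoop w r = (r.take w.toNat).filter (· ≠ 0) := by
  unfold pvDelLoop
  rw [PySem.List.slice_to r hw]
  set h := r.take w.toNat
  rw [foldl_ignore, PySem.List.length_pyRange_one]
  have : ((PySem.List.count h 0 : Nat) : Int) - 0 = ((h.count 0 : Nat) : Int) := by
    simp [PySem.List.count]
  rw [this, Int.toNat_natCast]
  exact iterate_del (h.count 0) h rfl

-- The two per-row transforms agree on long-enough rows (0 ≤ w ≤ len row).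
theorem row_eq (w : Int) (r : List Int) (hw0 : 0 ≤ w) (hw : w ≤ (r.length : Int)) :
    pvInnerA w r = pvSplice (pvDelLoop w r) r := by
  have hwk : w = ((w.toNat : Nat) : Int) := (Int.toNat_of_nonneg hw0).symm
  have hk : w.toNat ≤ r.length := by omega
  unfold pvInnerA pvSplice
  rw [pvDelLoop_eq w r hw0, hwk, pvInnerA_invariant r w.toNat hk]
  simp
  rw [show (max w 0).toNat = w.toNat by omega]

-- With a negative width both sides leave a zero-free-sliced row unchanged.
theorem row_eq_neg (w : Int) (r : List Int) (hw : w < 0)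
    (hz : (0 : Int) ∉ PySem.List.slice r none (some w)) :
    pvInnerA w r = pvSplice (pvDelLoop w r) r := by
  have hA : pvInnerA w r = r := by
    unfold pvInnerA
    rw [PySem.List.pyRange_one_eq_nil (le_of_lt hw)]
    rfl
  have hkpos : 0 < (-w).toNat := by omega
  have hwk : w = -(((-w).toNat : Nat) : Int) := by omega
  have hs : PySem.List.slice r none (some w) = r.take (r.length - (-w).toNat) := by
    have h0 := PySem.List.slice_to_neg_natCast r (-w).toNat hkpos
    rw [← hwk] at h0
    exact h0
  rw [hs] at hz
  have hcnt : PySem.List.count (r.take (r.length - (-w).toNat)) 0 = 0 := by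
    rw [PySem.List.count_eq, List.count_eq_zero]
    exact hz
  have hB : pvDelLoop w r = r.take (r.length - (-w).toNat) := by
    unfold pvDelLoop
    rw [hs, hcnt]
    rw [show ((0 : Nat) : Int) = 0 from rfl, PySem.List.pyRange_one_eq_nil (le_refl 0)]
    rfl
  rw [hA, hB]
  unfold pvSplice
  rw [List.length_take, min_eq_left (Nat.sub_le _ _), List.take_append_drop]

-- The outer loop, for ANY per-row transform f: it maps f over the first k rows.
theorem outer_foldl (f : List Int → List Int) (g : List (List Int)) (k : Nat) :
    (PySem.List.pyRange 0 (k : Int) 1).foldl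
      (fun acc y =>
        match PySem.List.pyGet? acc y with
        | none => acc
        | some row => pvSet acc y (f row))
      g
    = (g.take k).map f ++ g.drop k := by
  induction k with
  | zero => simp [PySem.List.pyRange_one_eq_nil]
  | succ k ih =>
    have hcast : ((k + 1 : Nat) : Int) = (k : Int) + 1 := by push_cast; ring
    rw [hcast, PySem.List.pyRange_one_succ_right (by positivity), List.foldl_append, ih]
    simp only [List.foldl_cons, List.foldl_nil]
    by_cases hk : k < g.length
    · have hmlen : ((g.take k).map f).length = k := by
        simp [List.length_take]; omega
      have hget : PySem.List.pyGet? ((g.take k).map f ++ g.drop k) ((k : Int)) = some g[k] := by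
        rw [PySem.List.pyGet?_natCast]
        rw [List.getElem?_append_right (by omega)]
        rw [List.getElem?_drop]
        rw [List.getElem?_eq_getElem (by omega)]
        congr 1
        congr 1
        omega
      have htake : g.take (k + 1) = g.take k ++ [g[k]] := by
        rw [List.take_add_one, List.getElem?_eq_getElem hk]
        rfl
      have hdrop : g.drop k = g[k] :: g.drop (k + 1) := List.drop_eq_getElem_cons hk
      rw [hget]
      show pvSet ((g.take k).map f ++ g.drop k) ((k : Int)) (f g[k]) = _
      unfold pvSet
      rw [if_pos (by positivity), Int.toNat_natCast, hdrop]
      rw [List.set_append_right _ _ (le_of_eq hmlen)]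
      rw [hmlen, Nat.sub_self, List.set_cons_zero, htake, List.map_append]
      simp [List.append_assoc]
    · have hge : g.length ≤ k := le_of_not_gt hk
      have hget : PySem.List.pyGet? ((g.take k).map f ++ g.drop k) ((k : Int)) = none := by
        rw [PySem.List.pyGet?_natCast, List.getElem?_eq_none]
        simp [List.length_take, List.length_drop]; omega
      rw [hget]
      have h1 : g.take (k + 1) = g.take k := by
        rw [List.take_of_length_le (by omega), List.take_of_length_le (by omega)]
      have h2 : g.drop (k + 1) = g.drop k := by
        rw [List.drop_of_length_le (by omega), List.drop_of_length_le (by omega)]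
      rw [h1, h2]

-- ===== VERDICT (by name: the statement is the Claim_ definition above) =====
theorem DoEvent_spec : Claim_equal_DoEvent := by
  intro g w h _ hpre
  unfold Spec_DoEvent DoEvent DoEvent_alt
  by_cases hh0 : h ≤ 0
  · rw [PySem.List.pyRange_one_eq_nil hh0]
    rfl
  · rcases hpre with hle | ⟨hh, hcase⟩
    · exact absurd hle hh0
    · have hcast : h = ((h.toNat : Nat) : Int) := (Int.toNat_of_nonneg (by omega)).symm
      rw [hcast]
      rw [outer_foldl (fun row => pvInnerA w row) g h.toNat]
      rw [outer_foldl (fun row => pvSplice (pvDelLoop w row) row) g h.toNat]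
      have : (g.take h.toNat).map (fun row => pvInnerA w row)
           = (g.take h.toNat).map (fun row => pvSplice (pvDelLoop w row) row) := by
        apply List.map_congr_left
        intro r hr
        rcases hcase with ⟨hw0, hrows⟩ | ⟨hwneg, hzf⟩
        · exact row_eq w r hw0 (hrows r hr)
        · exact row_eq_neg w r hwneg (hzf r hr)
      rw [this]
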